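-- pv_equiv track=rewrite | github.com/cmacboyd/advent-of-code | 2022/15/part2.py | get_manhattan_circle
-- ===== SOURCE A (Python) =====
-- def get_manhattan_distance(s, b):
-- 	return abs(s[0]-b[0]) + abs(s[1]-b[1])
--
-- def get_manhattan_circle(sensor, dist):
-- 	# get the top and bottom of the cirlce
-- 	sx, sy = sensor
-- 	top = sy+dist
-- 	bottom = sy-dist
--
-- 	marker = [sx, top]
-- 	x_ranges = {}
-- 	while marker[1] >= bottom:
-- 		this_dist = get_manhattan_distance(marker, sensor)
-- 		extra = abs(this_dist-dist)
-- 		x_range = [sx-extra, sx+extra]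
-- 		x_ranges[marker[1]] = x_range
--
-- 		# decrement the y value (go down one)
-- 		marker[1] -= 1
--
-- 	return x_ranges
-- ===== SOURCE B (Python) =====
-- def get_manhattan_circle(sensor, dist):
-- 	sx, sy = sensor
-- 	if dist < 0:
-- 		return {}
-- 	x_ranges = {sy + dist - k: [sx - k, sx + k] for k in range(dist)}
-- 	x_ranges.update({sy - k: [sx - dist + k, sx + dist - k] for k in range(dist + 1)})
-- 	return x_ranges
-- ===== Notes on version B (the rewrite author's own statement) =====
-- stated objective: faster
-- what changed: Replaced A's while-loop that mutates a marker and recomputes a Manhattan distance per row with two closed-form dict comprehensions (upper half with growing half-width, lower half with shrinking half-width) merged by dict.update.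
import Mathlib
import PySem

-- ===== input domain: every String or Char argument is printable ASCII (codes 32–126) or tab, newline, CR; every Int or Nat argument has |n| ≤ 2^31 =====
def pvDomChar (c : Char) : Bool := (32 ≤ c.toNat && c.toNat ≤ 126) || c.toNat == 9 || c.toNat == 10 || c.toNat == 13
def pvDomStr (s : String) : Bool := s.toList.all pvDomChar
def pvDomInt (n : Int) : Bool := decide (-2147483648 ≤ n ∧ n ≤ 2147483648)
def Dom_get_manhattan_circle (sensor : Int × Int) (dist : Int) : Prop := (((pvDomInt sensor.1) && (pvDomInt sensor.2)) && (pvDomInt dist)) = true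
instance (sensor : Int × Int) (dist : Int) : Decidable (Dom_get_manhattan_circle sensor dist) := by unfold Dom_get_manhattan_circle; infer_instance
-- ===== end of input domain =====

-- B replaces A's marker-mutating while-loop (one Manhattan-distance call per row) by two
-- closed-form dict comprehensions over the radius, merged with update; same values, same order.

-- ===== PORT A =====
def get_manhattan_distance (s b : Int × Int) : Int := |s.1 - b.1| + |s.2 - b.2|

-- the while-loop: marker = [sx, y], decremented until y < bottom; fuel = exact iteration
-- count (y + 1 - bottom).toNat, a totality guard only (fuel 0 coincides with y < bottom)
def gmcLoop (sx sy dist bottom : Int) (y : Int) (acc : PySem.Dict Int (List Int)) :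
    Nat → PySem.Dict Int (List Int)
  | 0 => acc
  | fuel + 1 =>
    if y ≥ bottom then
      let this_dist := get_manhattan_distance (sx, y) (sx, sy)
      let extra := |this_dist - dist|
      gmcLoop sx sy dist bottom (y - 1) (acc.insert y [sx - extra, sx + extra]) fuel
    else acc

def get_manhattan_circle (sensor : Int × Int) (dist : Int) : List (Int × List Int) :=
  let sx := sensor.1
  let sy := sensor.2
  let top := sy + dist
  let bottom := sy - dist
  (gmcLoop sx sy dist bottom top PySem.Dict.empty (top + 1 - bottom).toNat).items

-- ===== PORT B =====
-- the two dict comprehensions have pairwise distinct, disjoint key sets, so the dict built by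
-- update is exactly the concatenation of the two comprehensions' item lists
def get_manhattan_circle_alt (sensor : Int × Int) (dist : Int) : List (Int × List Int) :=
  let sx := sensor.1
  let sy := sensor.2
  if dist < 0 then []
  else
    (PySem.List.pyRange 0 dist 1).map (fun k => (sy + dist - k, [sx - k, sx + k])) ++
    (PySem.List.pyRange 0 (dist + 1) 1).map (fun k => (sy - k, [sx - dist + k, sx + dist - k]))

-- ===== PRECONDITION & SPEC =====
def Spec_get_manhattan_circle (sensor : Int × Int) (dist : Int) (out : List (Int × List Int)) : Prop := out = get_manhattan_circle_alt sensor dist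
instance (sensor : Int × Int) (dist : Int) (out : List (Int × List Int)) : Decidable (Spec_get_manhattan_circle sensor dist out) := by unfold Spec_get_manhattan_circle; infer_instance

-- ===== CLAIM (what is proved, stated in full; the proofs are below) =====
def Claim_equal_get_manhattan_circle : Prop := ∀ (sensor : Int × Int) (dist : Int), Dom_get_manhattan_circle sensor dist → Spec_get_manhattan_circle sensor dist (get_manhattan_circle sensor dist)

-- ===== LEMMAS AND PROOFS =====

-- closed form of one loop entry
def gmcEntry (sx sy dist y : Int) : Int × List Int :=
  (y, [sx - |(|y - sy|) - dist|, sx + |(|y - sy|) - dist|])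

theorem gmcLoop_not_contains (bottom : Int) (n : Nat) (acc : PySem.Dict Int (List Int))
    (hacc : ∀ k ∈ acc.keys, bottom + n < k) : acc.contains (bottom + n) = false := by
  by_contra h
  have h' : acc.contains (bottom + (n : Int)) = true := by
    cases hc : acc.contains (bottom + (n : Int)) with
    | false => exact absurd hc h
    | true => rfl
  have := hacc _ ((PySem.Dict.contains_iff_mem_keys acc _).mp h')
  omega

theorem gmcLoop_step (sx sy dist bottom y : Int) (acc : PySem.Dict Int (List Int)) (fuel : Nat)
    (h : y ≥ bottom) :
    gmcLoop sx sy dist bottom y acc (fuel + 1) =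
      gmcLoop sx sy dist bottom (y - 1)
        (acc.insert y [sx - |get_manhattan_distance (sx, y) (sx, sy) - dist|,
                       sx + |get_manhattan_distance (sx, y) (sx, sy) - dist|]) fuel := by
  rw [gmcLoop, if_pos h]

theorem gmc_insert_val (sx sy dist y : Int) :
    (y, [sx - |get_manhattan_distance (sx, y) (sx, sy) - dist|,
         sx + |get_manhattan_distance (sx, y) (sx, sy) - dist|]) = gmcEntry sx sy dist y := by
  simp [gmcEntry, get_manhattan_distance]

theorem range_map_shift (sx sy dist bottom : Int) (m : Nat) :
    (List.range (m + 1 + 1)).map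
        (fun i : Nat => gmcEntry sx sy dist (bottom + ((m + 1 : Nat) : Int) - (i : Int))) =
      gmcEntry sx sy dist (bottom + ((m + 1 : Nat) : Int)) ::
        (List.range (m + 1)).map (fun i : Nat => gmcEntry sx sy dist (bottom + (m : Int) - (i : Int))) := by
  rw [List.range_succ_eq_map, List.map_cons, List.map_map]
  congr 1
  · congr 1
    push_cast
    ring
  · apply List.map_congr_left
    intro i _
    show gmcEntry sx sy dist (bottom + ((m + 1 : Nat) : Int) - ((i + 1 : Nat) : Int)) =
      gmcEntry sx sy dist (bottom + (m : Int) - (i : Int))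
    congr 1
    push_cast
    ring

theorem gmcLoop_spec (sx sy dist bottom : Int) :
    ∀ (n : Nat) (acc : PySem.Dict Int (List Int)),
      (∀ k ∈ acc.keys, bottom + n < k) →
      (gmcLoop sx sy dist bottom (bottom + n) acc (n + 1)).items =
        acc.items ++
          (List.range (n + 1)).map (fun i : Nat => gmcEntry sx sy dist (bottom + n - (i : Int))) := by
  intro n
  induction n with
  | zero =>
    intro acc hacc
    rw [gmcLoop_step sx sy dist bottom _ acc 0 (by omega)]
    show ((acc.insert (bottom + ((0 : Nat) : Int)) _).items) = _
    rw [PySem.Dict.items_insert_of_not_contains _ _ (gmcLoop_not_contains bottom 0 acc hacc),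
      gmc_insert_val]
    simp [gmcEntry]
  | succ m ih =>
    intro acc hacc
    rw [gmcLoop_step sx sy dist bottom _ acc (m + 1) (by omega)]
    have hkey : ∀ k ∈ (acc.insert (bottom + ((m + 1 : Nat) : Int))
        [sx - |get_manhattan_distance (sx, bottom + ((m + 1 : Nat) : Int)) (sx, sy) - dist|,
         sx + |get_manhattan_distance (sx, bottom + ((m + 1 : Nat) : Int)) (sx, sy) - dist|]).keys,
        bottom + (m : Int) < k := by
      intro k hk
      rcases (PySem.Dict.mem_keys_insert _ _ _ _).mp hk with h | h
      · omega
      · have := hacc k h; omega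
    have heq : bottom + ((m + 1 : Nat) : Int) - 1 = bottom + (m : Int) := by push_cast; ring
    rw [heq, ih _ hkey,
      PySem.Dict.items_insert_of_not_contains _ _ (gmcLoop_not_contains bottom (m + 1) acc hacc),
      gmc_insert_val, List.append_assoc, List.singleton_append, range_map_shift]

theorem alt_eq_range (sx sy dist : Int) (hd : 0 ≤ dist) :
    get_manhattan_circle_alt (sx, sy) dist =
      (List.range ((2 * dist).toNat + 1)).map
        (fun i : Nat => gmcEntry sx sy dist (sy - dist + 2 * dist - (i : Int))) := by
  have h2 : (2 * dist).toNat + 1 = dist.toNat + (dist.toNat + 1) := by omega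
  rw [h2, List.range_add, List.map_append, List.map_map]
  simp only [get_manhattan_circle_alt]
  rw [if_neg (by omega)]
  congr 1
  · rw [PySem.List.pyRange_one, List.map_map,
      show ((dist - 0).toNat) = dist.toNat from by omega]
    apply List.map_congr_left
    intro k hk
    have hk' : (k : Int) < dist := by
      have := List.mem_range.mp hk; omega
    show (sy + dist - (0 + (k : Int)), [sx - (0 + (k : Int)), sx + (0 + (k : Int))]) =
      gmcEntry sx sy dist (sy - dist + 2 * dist - (k : Int))
    simp only [gmcEntry, zero_add]
    have ha1 : |sy - dist + 2 * dist - (k : Int) - sy| = dist - (k : Int) := by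
      rw [show sy - dist + 2 * dist - (k : Int) - sy = dist - (k : Int) by ring]
      exact abs_of_nonneg (by omega)
    have ha2 : |dist - (k : Int) - dist| = (k : Int) := by
      rw [show dist - (k : Int) - dist = -(k : Int) by ring, abs_neg]
      exact abs_of_nonneg (by omega)
    rw [ha1, ha2]
    simp only [Prod.mk.injEq, and_true]
    omega
  · rw [PySem.List.pyRange_one, List.map_map,
      show ((dist + 1 - 0).toNat) = dist.toNat + 1 from by omega]
    apply List.map_congr_left
    intro k hk
    have hk' : (k : Int) < dist + 1 := by
      have := List.mem_range.mp hk; omega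
    show (sy - (0 + (k : Int)), [sx - dist + (0 + (k : Int)), sx + dist - (0 + (k : Int))]) =
      gmcEntry sx sy dist (sy - dist + 2 * dist - ((dist.toNat + k : Nat) : Int))
    simp only [gmcEntry, zero_add]
    have hy : sy - dist + 2 * dist - ((dist.toNat + k : Nat) : Int) = sy - (k : Int) := by
      push_cast; omega
    rw [hy]
    have ha1 : |sy - (k : Int) - sy| = (k : Int) := by
      rw [show sy - (k : Int) - sy = -(k : Int) by ring, abs_neg]
      exact abs_of_nonneg (by omega)
    have ha2 : |(k : Int) - dist| = dist - (k : Int) := by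
      rw [abs_sub_comm]
      exact abs_of_nonneg (by omega)
    rw [ha1, ha2, show sx - dist + (k : Int) = sx - (dist - (k : Int)) from by ring,
      show sx + dist - (k : Int) = sx + (dist - (k : Int)) from by ring]

theorem get_manhattan_circle_spec : Claim_equal_get_manhattan_circle := by
  intro sensor dist _
  unfold Spec_get_manhattan_circle
  obtain ⟨sx, sy⟩ := sensor
  by_cases hd : dist < 0
  · simp only [get_manhattan_circle, get_manhattan_circle_alt]
    rw [if_pos hd]
    rcases hn : (sy + dist + 1 - (sy - dist)).toNat with _ | n
    · rfl
    · rw [gmcLoop]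
      rw [if_neg (by omega)]
      rfl
  · have hd' : 0 ≤ dist := by omega
    simp only [get_manhattan_circle]
    have htop : sy + dist = (sy - dist) + (((2 * dist).toNat : Nat) : Int) := by omega
    have hfuel : (sy + dist + 1 - (sy - dist)).toNat = (2 * dist).toNat + 1 := by omega
    rw [hfuel, htop, gmcLoop_spec sx sy dist (sy - dist) ((2 * dist).toNat) PySem.Dict.empty
      (by intro k hk; simp [PySem.Dict.empty, PySem.Dict.keys] at hk)]
    rw [alt_eq_range sx sy dist hd']
    have hcast : (((2 * dist).toNat : Nat) : Int) = 2 * dist := by omega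
    rw [hcast]
    rfl
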